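-- pv_equiv track=rewrite | github.com/dragon434/untitled | 未定义项目练习/GetBAsic.py | execute
-- ===== SOURCE A (Python) =====
-- def findLine(prog, target):
--     for i in range(0, len(prog)):
--         if prog[i].startswith(target):
--             return i
--
-- def execute(prog):
--     location = 0
--     args = []
--     while True:
--         if location == len(prog) - 1: return "success"
--         T = prog[location].split()[0]
--         location = findLine(prog, T)
--         T = prog[location].split()[-1]
--         location = findLine(prog, T)
--         args.append('loop')
--         if len(args) >= len(prog):
--             return "infinite loop"
-- ===== SOURCE B (Python) =====
-- def execute(prog):
--     # Precompute: map every prefix of every line to the first line index having it.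
--     first = {}
--     for i, line in enumerate(prog):
--         for k in range(len(line) + 1):
--             p = line[:k]
--             if p not in first:
--                 first[p] = i
--     location = 0
--     steps = 0
--     while True:
--         if location == len(prog) - 1:
--             return "success"
--         location = first[prog[location].split()[0]]
--         location = first[prog[location].split()[-1]]
--         steps += 1
--         if steps >= len(prog):
--             return "infinite loop"
-- ===== Notes on version B (the rewrite author's own statement) =====
-- stated objective: alternative
-- what changed: B replaces A's per-step linear findLine scans with a prefix index built once (every prefix of every line mapped to the first line index carrying it), so each jump of the transition walk is a single dictionary lookup instead of a scan over all lines.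
import Mathlib
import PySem

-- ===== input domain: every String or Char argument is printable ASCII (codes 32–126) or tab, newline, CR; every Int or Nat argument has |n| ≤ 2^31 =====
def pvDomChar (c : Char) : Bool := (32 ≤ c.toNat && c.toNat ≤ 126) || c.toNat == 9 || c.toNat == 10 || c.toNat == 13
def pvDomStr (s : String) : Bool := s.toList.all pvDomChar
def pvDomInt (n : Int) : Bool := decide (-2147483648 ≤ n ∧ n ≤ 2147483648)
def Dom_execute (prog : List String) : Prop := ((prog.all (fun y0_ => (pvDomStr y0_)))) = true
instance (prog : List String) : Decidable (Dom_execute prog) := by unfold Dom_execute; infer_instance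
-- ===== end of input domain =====

-- B replaces A's per-step linear findLine scans by a prefix→first-line-index dictionary built once,
-- then walks the transitions with plain lookups (objective: alternative algorithm, same measured cost).

-- ===== PORT A =====
-- findLine: 'for i in range(0, len(prog)): if prog[i].startswith(target): return i'
def findLineGo (target : String) (i : Int) : List String → Option Int
  | [] => none
  | l :: ls => if PySem.Str.startswith l target then some i else findLineGo target (i+1) ls

def findLine (prog : List String) (target : String) : Option Int :=
  findLineGo target 0 prog

-- the 'while True' loop of A; fuel bounds the iteration count (the loop returns after at most
-- len(prog) appends); "" is the junk value on paths where the Python raises (outside Pre_).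
def executeLoop (prog : List String) (location : Int) (argsLen : Nat) : Nat → String
  | 0 => ""
  | fuel+1 =>
    if location = (prog.length : Int) - 1 then "success"
    else
      match PySem.List.pyGet? prog location with
      | none => ""
      | some line =>
        match PySem.List.pyGet? (PySem.Str.split₀ line) 0 with
        | none => ""
        | some T =>
          match findLine prog T with
          | none => ""
          | some loc1 =>
            match PySem.List.pyGet? prog loc1 with
            | none => ""
            | some line1 =>
              match PySem.List.pyGet? (PySem.Str.split₀ line1) (-1) with
              | none => ""
              | some T2 =>
                match findLine prog T2 with
                | none => ""
                | some loc2 =>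
                  if prog.length ≤ argsLen + 1 then "infinite loop"
                  else executeLoop prog loc2 (argsLen+1) fuel

def execute (prog : List String) : String :=
  executeLoop prog 0 0 (prog.length + 1)

-- ===== PORT B =====
-- 'first': every prefix line[:k] of every line, mapped (if not already present) to its line index.
def buildFirst (prog : List String) : PySem.Dict String Int :=
  (PySem.List.enumerate prog).foldl
    (fun d p =>
      (PySem.List.pyRange 0 ((PySem.Str.len p.2 : Int) + 1) 1).foldl
        (fun d k =>
          if d.contains (PySem.Str.slice p.2 none (some k)) then d
          else d.insert (PySem.Str.slice p.2 none (some k)) p.1) d)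
    PySem.Dict.empty

-- B's walk: same transition loop, but each jump is one nested lookup expression
-- 'first[prog[location].split()[0]]' (ported as a bind chain; none = the Python raises, junk "").
def executeAltLoop (first : PySem.Dict String Int) (prog : List String) (location : Int)
    (steps : Nat) : Nat → String
  | 0 => ""
  | fuel+1 =>
    if location = (prog.length : Int) - 1 then "success"
    else
      let loc1? := ((PySem.List.pyGet? prog location).bind
          (fun line => PySem.List.pyGet? (PySem.Str.split₀ line) 0)).bind first.get?
      let loc2? := ((loc1?.bind (PySem.List.pyGet? prog)).bind
          (fun line => PySem.List.pyGet? (PySem.Str.split₀ line) (-1))).bind first.get?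
      match loc2? with
      | none => ""
      | some loc2 =>
        if prog.length ≤ steps + 1 then "infinite loop"
        else executeAltLoop first prog loc2 (steps+1) fuel

def execute_alt (prog : List String) : String :=
  executeAltLoop (buildFirst prog) prog 0 0 (prog.length + 1)

-- ===== PRECONDITION & SPEC =====
-- A's exceptions are path-dependent: it raises (IndexError/TypeError) exactly when some VISITED line
-- has no words or has a first/last word that is a prefix of no line (or prog is empty). Pre_ states
-- exactly that — "the k-th visited location is defined for every k ≤ len(prog)" — so it excludes
-- precisely the inputs on which A raises and admits every input on which A returns.
-- preStep: the location reached from location i by one loop iteration of A, as a declarative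
-- specification (first-match index via List.findIdx?); none = that iteration raises.
def preStep (prog : List String) (i : Nat) : Option Nat :=
  (prog[i]?).bind (fun line =>
    ((PySem.Str.split₀ line).head?).bind (fun t =>
      (prog.findIdx? (fun l => PySem.Str.startswith l t)).bind (fun j =>
        (prog[j]?).bind (fun line1 =>
          ((PySem.Str.split₀ line1).getLast?).bind (fun t2 =>
            prog.findIdx? (fun l => PySem.Str.startswith l t2))))))

-- the location after k iterations, frozen once the success line (index len−1) is reached
def preVisited (prog : List String) : Nat → Option Nat
  | 0 => if prog.isEmpty then none else some 0
  | k+1 => (preVisited prog k).bind (fun l =>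
      if l + 1 = prog.length then some l else preStep prog l)

def Pre_execute (prog : List String) : Prop :=
  ∀ k ≤ prog.length, preVisited prog k ≠ none
instance (prog : List String) : Decidable (Pre_execute prog) := by unfold Pre_execute; infer_instance

def pvWitness_execute : List String := ["a a", "a"]

def Spec_execute (prog : List String) (out : String) : Prop := out = execute_alt prog
instance (prog : List String) (out : String) : Decidable (Spec_execute prog out) := by unfold Spec_execute; infer_instance

-- ===== CLAIM (what is proved, stated in full; the proofs are below) =====
def Claim_equal_execute : Prop := ∀ (prog : List String), Dom_execute prog → Pre_execute prog → Spec_execute prog (execute prog)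

-- ===== LEMMAS AND PROOFS =====

-- insert-if-absent over a list of keys, all with the same value: first occurrence wins, old bindings kept
theorem get?_foldl_insert_if_absent {β : Type} (ks : List β) (f : β → String) (d : PySem.Dict String Int) (i : Int) (t : String) :
    (ks.foldl (fun d p => if d.contains (f p) then d else d.insert (f p) i) d).get? t
      = if (∃ p ∈ ks, f p = t) ∧ d.get? t = none then some i else d.get? t := by
  induction ks generalizing d with
  | nil => simp
  | cons k ks ih =>
    simp only [List.foldl_cons, ih]
    rw [PySem.Dict.contains_eq_isSome_get?]
    by_cases hk : (d.get? (f k)).isSome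
    · rw [if_pos hk]
      by_cases ht : t = f k
      · subst ht
        rcases Option.isSome_iff_exists.mp hk with ⟨v, hv⟩
        simp [hv, List.mem_cons]
      · simp [List.mem_cons, Ne.symm ht]
    · rw [if_neg hk]
      by_cases ht : t = f k
      · subst ht
        simp [PySem.Dict.get?_insert_self, Option.not_isSome_iff_eq_none.mp hk, List.mem_cons]
      · rw [PySem.Dict.get?_insert_of_ne _ _ ht]
        simp [List.mem_cons, Ne.symm ht]

-- the keys inserted for one line are exactly its prefixes, and t is one of them iff line startswith t
theorem mem_prefixKeys_iff (line t : String) :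
    (∃ k ∈ PySem.List.pyRange 0 ((PySem.Str.len line : Int) + 1) 1,
        PySem.Str.slice line none (some k) = t) ↔ PySem.Str.startswith line t = true := by
  rw [PySem.Str.startswith_eq, PySem.Chars.startswith_iff]
  constructor
  · rintro ⟨k, hk, hs⟩
    have hk' := PySem.List.mem_pyRange_one.mp hk
    have h0 : (0:Int) ≤ k := hk'.1
    have ht : t.toList = line.toList.take k.toNat := by
      rw [← hs]
      simp [pysem, PySem.List.slice_to _ h0]
    rw [ht]
    exact List.take_prefix _ _
  · intro hp
    refine ⟨(t.toList.length : Int), ?_, ?_⟩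
    · rw [PySem.List.mem_pyRange_one]
      have := hp.length_le
      simp only [PySem.Str.len_eq, String.length_toList] at *
      omega
    · apply String.toList_inj.mp
      rw [PySem.Str.toList_slice, PySem.Chars.slice_eq_listSlice, PySem.List.slice_to_natCast]
      rw [String.length_toList]
      exact (List.prefix_iff_eq_take.mp hp).symm

-- one line's inner fold, as a lookup statement
theorem get?_addLine (d : PySem.Dict String Int) (i : Int) (line t : String) :
    ((PySem.List.pyRange 0 ((PySem.Str.len line : Int) + 1) 1).foldl
        (fun d k =>
          if d.contains (PySem.Str.slice line none (some k)) then d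
          else d.insert (PySem.Str.slice line none (some k)) i) d).get? t
      = if PySem.Str.startswith line t = true ∧ d.get? t = none then some i else d.get? t := by
  rw [get?_foldl_insert_if_absent _ (fun k => PySem.Str.slice line none (some k))]
  rw [if_congr (and_congr_left' (mem_prefixKeys_iff line t)) rfl rfl]

-- the enumerate fold computes findLine (first match wins; earlier bindings kept)
theorem get?_enumFold (ls : List String) (s : Int) (d : PySem.Dict String Int) (t : String) :
    ((PySem.List.enumerate ls s).foldl
        (fun d p =>
          (PySem.List.pyRange 0 ((PySem.Str.len p.2 : Int) + 1) 1).foldl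
            (fun d k =>
              let pre := PySem.Str.slice p.2 none (some k)
              if d.contains pre then d else d.insert pre p.1) d) d).get? t
      = if d.get? t = none then findLineGo t s ls else d.get? t := by
  induction ls generalizing s d with
  | nil => simp [findLineGo]
  | cons l ls ih =>
    rw [PySem.List.enumerate_cons, List.foldl_cons, ih, get?_addLine, findLineGo]
    by_cases hd : d.get? t = none
    · cases hb : PySem.Chars.startswith l.toList t.toList <;> simp [hd, hb]
    · simp [hd]

theorem get?_buildFirst (prog : List String) (t : String) :
    (buildFirst prog).get? t = findLine prog t := by
  unfold buildFirst findLine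
  rw [get?_enumFold]
  simp

theorem loop_eq (prog : List String) (fuel : Nat) (location : Int) (n : Nat) :
    executeLoop prog location n fuel = executeAltLoop (buildFirst prog) prog location n fuel := by
  induction fuel generalizing location n with
  | zero => rfl
  | succ fuel ih =>
    rw [executeLoop, executeAltLoop]
    simp only [get?_buildFirst]
    by_cases hloc : location = (prog.length : Int) - 1
    · simp [hloc]
    · simp only [hloc, if_false]
      cases h1 : PySem.List.pyGet? prog location with
      | none => simp
      | some line =>
        cases h2 : PySem.List.pyGet? (PySem.Str.split₀ line) 0 with
        | none => simp [h2]
        | some T =>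
          cases h3 : findLine prog T with
          | none => simp [h2, h3]
          | some loc1 =>
            cases h4 : PySem.List.pyGet? prog loc1 with
            | none => simp [h2, h3, h4]
            | some line1 =>
              cases h5 : PySem.List.pyGet? (PySem.Str.split₀ line1) (-1) with
              | none => simp [h2, h3, h4, h5]
              | some T2 =>
                cases h6 : findLine prog T2 with
                | none => simp [h2, h3, h4, h5, h6]
                | some loc2 =>
                  simp only [h2, h3, h4, h5, h6, Option.bind_some]
                  split <;> [rfl; exact ih _ _]

-- ===== VERDICT (by name: the statement is the Claim_ definition above) =====
theorem execute_spec : Claim_equal_execute := by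
  intro prog _ _
  unfold Spec_execute execute execute_alt
  exact loop_eq prog (prog.length + 1) 0 0
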